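-- pv_equiv track=rewrite | github.com/bcharris9/sdgfqaef | circuit_debug_api/hybrid_runtime.py | _ordered_measurement_keys
-- ===== SOURCE A (Python) =====
-- from typing import Any
--
-- def _metric_suffix_priority(key: str, stat_mode: str) -> tuple[int, bool]:
--     """Rank measurement suffixes and decide whether a key is allowed in the prompt."""
--     low = key.lower()
--     if low.endswith("_max"):
--         suffix_rank = 0
--     elif low.endswith("_rms"):
--         suffix_rank = 1
--     elif low.endswith("_min"):
--         suffix_rank = 2
--     else:
--         suffix_rank = 3
--     if stat_mode == "full":
--         allowed = True
--     elif stat_mode == "max_only":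
--         allowed = low.endswith("_max") or ("_" not in low)
--     else:
--         allowed = low.endswith("_max") or low.endswith("_rms") or ("_" not in low)
--     return suffix_rank, allowed
--
-- def _measurement_group_priority(key: str, prefer_voltage_keys: bool) -> int:
--     """Prefer voltage or current features depending on the configured prompt strategy."""
--     low = key.lower()
--     if low.startswith("v_"):
--         return 0 if prefer_voltage_keys else 1
--     if low.startswith("i_"):
--         return 1 if prefer_voltage_keys else 0
--     if low in {"temp", "tnom"}:
--         return 2
--     if low in {"method", "solver"}:
--         return 3
--     return 4
--
-- def _ordered_measurement_keys(
--     measurements: dict[str, Any],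
--     max_measurements: int,
--     voltage_only: bool,
--     stat_mode: str,
--     prefer_voltage_keys: bool,
-- ) -> list[str]:
--     """Choose the subset of measurement keys that should appear in the prompt."""
--     ranked: list[tuple[tuple[int, int, str], str]] = []
--     for key in measurements.keys():
--         low = str(key).lower()
--         if voltage_only and not low.startswith("v_"):
--             continue
--         suffix_rank, allowed = _metric_suffix_priority(low, stat_mode)
--         if not allowed:
--             continue
--         group_rank = _measurement_group_priority(low, prefer_voltage_keys)
--         ranked.append(((group_rank, suffix_rank, low), str(key)))
--     ranked.sort(key=lambda x: x[0])
--     keys = [k for _, k in ranked]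
--     return keys[: max(1, max_measurements)] if keys else []
-- ===== SOURCE B (Python) =====
-- from typing import Any
--
-- def _metric_suffix_priority(key: str, stat_mode: str) -> tuple[int, bool]:
--     """Rank measurement suffixes and decide whether a key is allowed in the prompt."""
--     low = key.lower()
--     if low.endswith("_max"):
--         suffix_rank = 0
--     elif low.endswith("_rms"):
--         suffix_rank = 1
--     elif low.endswith("_min"):
--         suffix_rank = 2
--     else:
--         suffix_rank = 3
--     if stat_mode == "full":
--         allowed = True
--     elif stat_mode == "max_only":
--         allowed = low.endswith("_max") or ("_" not in low)
--     else:
--         allowed = low.endswith("_max") or low.endswith("_rms") or ("_" not in low)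
--     return suffix_rank, allowed
--
-- def _measurement_group_priority(key: str, prefer_voltage_keys: bool) -> int:
--     """Prefer voltage or current features depending on the configured prompt strategy."""
--     low = key.lower()
--     if low.startswith("v_"):
--         return 0 if prefer_voltage_keys else 1
--     if low.startswith("i_"):
--         return 1 if prefer_voltage_keys else 0
--     if low in {"temp", "tnom"}:
--         return 2
--     if low in {"method", "solver"}:
--         return 3
--     return 4
--
-- def _ordered_measurement_keys(
--     measurements: dict[str, Any],
--     max_measurements: int,
--     voltage_only: bool,
--     stat_mode: str,
--     prefer_voltage_keys: bool,
-- ) -> list[str]: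
--     """Rank-table variant: one filtering pass collecting (group, suffix, low, key),
--     then walk the 5x4 discrete rank grid in order and stably sort each bucket by
--     the lowercase key alone -- no comparison sort over a composite tuple."""
--     survivors: list[tuple[int, int, str, str]] = []
--     for key in measurements.keys():
--         low = str(key).lower()
--         if voltage_only and not low.startswith("v_"):
--             continue
--         suffix_rank, allowed = _metric_suffix_priority(low, stat_mode)
--         if not allowed:
--             continue
--         survivors.append(
--             (_measurement_group_priority(low, prefer_voltage_keys), suffix_rank, low, str(key))
--         )
--     keys: list[str] = []
--     for g in range(5):
--         for s in range(4):
--             bucket = [(low, k) for (g2, s2, low, k) in survivors if g2 == g and s2 == s]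
--             bucket.sort(key=lambda t: t[0])
--             keys.extend(k for _, k in bucket)
--     return keys[: max(1, max_measurements)] if keys else []
-- ===== Notes on version B (the rewrite author's own statement) =====
-- stated objective: alternative
-- what changed: Replaces the stable comparison sort over composite (group, suffix, low) tuples by a rank-table partition: one filtering pass buckets survivors by the discrete (group, suffix) grid, then each of the 20 buckets is stably sorted by the lowercase key alone and concatenated in grid order.
import Mathlib
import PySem

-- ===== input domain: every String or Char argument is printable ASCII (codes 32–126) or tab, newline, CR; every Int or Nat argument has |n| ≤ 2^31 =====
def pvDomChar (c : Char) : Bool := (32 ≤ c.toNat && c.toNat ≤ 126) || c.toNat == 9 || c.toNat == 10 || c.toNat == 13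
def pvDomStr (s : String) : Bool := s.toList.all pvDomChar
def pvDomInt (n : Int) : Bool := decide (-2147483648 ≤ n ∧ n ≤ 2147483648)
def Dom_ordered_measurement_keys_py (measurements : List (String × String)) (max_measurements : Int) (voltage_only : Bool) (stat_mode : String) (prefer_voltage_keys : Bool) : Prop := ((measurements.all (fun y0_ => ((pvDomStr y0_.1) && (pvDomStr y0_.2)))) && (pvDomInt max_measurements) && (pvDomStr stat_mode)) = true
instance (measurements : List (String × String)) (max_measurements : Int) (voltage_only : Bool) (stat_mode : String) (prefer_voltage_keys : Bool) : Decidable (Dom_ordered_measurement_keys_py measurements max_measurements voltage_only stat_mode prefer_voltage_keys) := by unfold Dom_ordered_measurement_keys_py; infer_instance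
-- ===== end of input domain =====

-- B restructures A's ranking: instead of one stable sort by the composite tuple
-- (group_rank, suffix_rank, low), it partitions the surviving keys into the 5×4
-- discrete (group, suffix) rank grid and stably sorts each bucket by the lowercase
-- key alone, concatenating the buckets in grid order (alternative decomposition,
-- same cost). Return values agree everywhere.

-- shared helpers (identical in both Python sources): the two priority functions
def pvMetricSuffixPriority (key : String) (stat_mode : String) : Int × Bool :=
  let low := PySem.Str.lower key
  let suffix_rank : Int :=
    if PySem.Str.endswith low "_max" then 0
    else if PySem.Str.endswith low "_rms" then 1
    else if PySem.Str.endswith low "_min" then 2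
    else 3
  let allowed : Bool :=
    if stat_mode == "full" then true
    else if stat_mode == "max_only" then PySem.Str.endswith low "_max" || !(PySem.Str.isIn "_" low)
    else PySem.Str.endswith low "_max" || PySem.Str.endswith low "_rms" || !(PySem.Str.isIn "_" low)
  (suffix_rank, allowed)

def pvGroupPriority (key : String) (prefer_voltage_keys : Bool) : Int :=
  let low := PySem.Str.lower key
  if PySem.Str.startswith low "v_" then (if prefer_voltage_keys then 0 else 1)
  else if PySem.Str.startswith low "i_" then (if prefer_voltage_keys then 1 else 0)
  else if low == "temp" || low == "tnom" then 2
  else if low == "method" || low == "solver" then 3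
  else 4

-- ===== PORT A =====
-- Python's `ranked.sort(key=lambda x: x[0])` compares (int, int, str) tuples
-- lexicographically; PySem.List.sorted takes a scalar key, so the stable
-- insertion sort is ported by hand with the lexicographic `before` test
-- (exactly PySem.List.sorted_eq_foldl_insertBy's shape).
def pvLexLt (a b : (Int × Int × String) × String) : Bool :=
  decide (a.1.1 < b.1.1) ||
    (a.1.1 == b.1.1 &&
      (decide (a.1.2.1 < b.1.2.1) ||
        (a.1.2.1 == b.1.2.1 && decide (a.1.2.2 < b.1.2.2))))

def ordered_measurement_keys_py (measurements : List (String × String)) (max_measurements : Int) (voltage_only : Bool) (stat_mode : String) (prefer_voltage_keys : Bool) : List String :=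
  -- measurements.keys(): first occurrence of each key, in insertion order
  let ranked : List ((Int × Int × String) × String) :=
    (PySem.List.dedup (measurements.map Prod.fst)).foldl (fun acc key =>
      let low := PySem.Str.lower key   -- str(key).lower(); keys are already str
      if voltage_only && !(PySem.Str.startswith low "v_") then acc
      else
        let sa := pvMetricSuffixPriority low stat_mode
        if !sa.2 then acc
        else acc ++ [((pvGroupPriority low prefer_voltage_keys, sa.1, low), key)]) []
  let rankedSorted := ranked.foldl (fun acc x => PySem.List.insertBy pvLexLt x acc) []
  let keys := rankedSorted.map (fun p => p.2)
  if keys.isEmpty then [] else PySem.List.slice keys none (some (max 1 max_measurements))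

-- ===== PORT B =====
def ordered_measurement_keys_py_alt (measurements : List (String × String)) (max_measurements : Int) (voltage_only : Bool) (stat_mode : String) (prefer_voltage_keys : Bool) : List String :=
  let survivors : List (Int × Int × String × String) :=
    (PySem.List.dedup (measurements.map Prod.fst)).foldl (fun acc key =>
      let low := PySem.Str.lower key
      if voltage_only && !(PySem.Str.startswith low "v_") then acc
      else
        let sa := pvMetricSuffixPriority low stat_mode
        if !sa.2 then acc
        else acc ++ [(pvGroupPriority low prefer_voltage_keys, sa.1, low, key)]) []
  let keys : List String :=
    (PySem.List.pyRange 0 5 1).foldl (fun acc g =>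
      (PySem.List.pyRange 0 4 1).foldl (fun acc2 s =>
        let bucket := (survivors.filter (fun t => t.1 == g && t.2.1 == s)).map (fun t => (t.2.2.1, t.2.2.2))
        acc2 ++ (PySem.List.sorted bucket (fun p => p.1) false).map (fun p => p.2)) acc) []
  if keys.isEmpty then [] else PySem.List.slice keys none (some (max 1 max_measurements))

-- ===== PRECONDITION & SPEC =====
def Spec_ordered_measurement_keys_py (measurements : List (String × String)) (max_measurements : Int) (voltage_only : Bool) (stat_mode : String) (prefer_voltage_keys : Bool) (out : List String) : Prop := out = ordered_measurement_keys_py_alt measurements max_measurements voltage_only stat_mode prefer_voltage_keys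
instance (measurements : List (String × String)) (max_measurements : Int) (voltage_only : Bool) (stat_mode : String) (prefer_voltage_keys : Bool) (out : List String) : Decidable (Spec_ordered_measurement_keys_py measurements max_measurements voltage_only stat_mode prefer_voltage_keys out) := by unfold Spec_ordered_measurement_keys_py; infer_instance

-- ===== CLAIM (what is proved, stated in full; the proofs are below) =====
def Claim_equal_ordered_measurement_keys_py : Prop := ∀ (measurements : List (String × String)) (max_measurements : Int) (voltage_only : Bool) (stat_mode : String) (prefer_voltage_keys : Bool), Dom_ordered_measurement_keys_py measurements max_measurements voltage_only stat_mode prefer_voltage_keys → Spec_ordered_measurement_keys_py measurements max_measurements voltage_only stat_mode prefer_voltage_keys (ordered_measurement_keys_py measurements max_measurements voltage_only stat_mode prefer_voltage_keys)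

-- ===== LEMMAS AND PROOFS =====

-- views of A's ranked entries used only by the proofs
def pvRank (x : (Int × Int × String) × String) : Int × Int := (x.1.1, x.1.2.1)
def pvLow (x : (Int × Int × String) × String) : String := x.1.2.2
def pvPairLt (a b : Int × Int) : Prop := a.1 < b.1 ∨ (a.1 = b.1 ∧ a.2 < b.2)
def pvGS : List (Int × Int) :=
  [(0,0),(0,1),(0,2),(0,3),(1,0),(1,1),(1,2),(1,3),(2,0),(2,1),(2,2),(2,3),
   (3,0),(3,1),(3,2),(3,3),(4,0),(4,1),(4,2),(4,3)]
def pvReshape (x : (Int × Int × String) × String) : Int × Int × String × String :=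
  (x.1.1, x.1.2.1, x.1.2.2, x.2)

def pvSortA (l : List ((Int × Int × String) × String)) : List ((Int × Int × String) × String) :=
  l.foldl (fun acc x => PySem.List.insertBy pvLexLt x acc) []

def pvBucket (l : List ((Int × Int × String) × String)) (gs : Int × Int) : List ((Int × Int × String) × String) :=
  PySem.List.sorted (l.filter (fun x => x.1.1 == gs.1 && x.1.2.1 == gs.2)) pvLow false

def pvP (vo : Bool) (sm : String) (key : String) : Bool :=
  !(vo && !(PySem.Str.startswith (PySem.Str.lower key) "v_")) && (pvMetricSuffixPriority (PySem.Str.lower key) sm).2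
def pvFA (sm : String) (pf : Bool) (key : String) : (Int × Int × String) × String :=
  ((pvGroupPriority (PySem.Str.lower key) pf, (pvMetricSuffixPriority (PySem.Str.lower key) sm).1, PySem.Str.lower key), key)
def pvFB (sm : String) (pf : Bool) (key : String) : Int × Int × String × String :=
  (pvGroupPriority (PySem.Str.lower key) pf, (pvMetricSuffixPriority (PySem.Str.lower key) sm).1, PySem.Str.lower key, key)

def pvStepA (vo : Bool) (sm : String) (pf : Bool) (acc : List ((Int × Int × String) × String)) (key : String) : List ((Int × Int × String) × String) :=
  if vo && !(PySem.Str.startswith (PySem.Str.lower key) "v_") then acc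
  else if !(pvMetricSuffixPriority (PySem.Str.lower key) sm).2 then acc
  else acc ++ [((pvGroupPriority (PySem.Str.lower key) pf, (pvMetricSuffixPriority (PySem.Str.lower key) sm).1, PySem.Str.lower key), key)]

def pvStepB (vo : Bool) (sm : String) (pf : Bool) (acc : List (Int × Int × String × String)) (key : String) : List (Int × Int × String × String) :=
  if vo && !(PySem.Str.startswith (PySem.Str.lower key) "v_") then acc
  else if !(pvMetricSuffixPriority (PySem.Str.lower key) sm).2 then acc
  else acc ++ [(pvGroupPriority (PySem.Str.lower key) pf, (pvMetricSuffixPriority (PySem.Str.lower key) sm).1, PySem.Str.lower key, key)]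

theorem pv_insertBy_append_left {α : Type} (before : α → α → Bool) (x : α) (l1 l2 : List α)
    (h : ∀ y ∈ l1, before x y = false) :
    PySem.List.insertBy before x (l1 ++ l2) = l1 ++ PySem.List.insertBy before x l2 := by
  induction l1 with
  | nil => simp
  | cons a t ih =>
    have ha := h a (by simp)
    simp only [List.cons_append, PySem.List.insertBy, ha]
    simp only [Bool.false_eq_true, if_false, List.cons.injEq, true_and]
    exact ih (fun y hy => h y (by simp [hy]))

theorem pv_insertBy_append_right {α : Type} (before : α → α → Bool) (x : α) (l1 l2 : List α)
    (h : ∀ y ∈ l2, before x y = true) :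
    PySem.List.insertBy before x (l1 ++ l2) = PySem.List.insertBy before x l1 ++ l2 := by
  induction l1 with
  | nil =>
    cases l2 with
    | nil => simp [PySem.List.insertBy]
    | cons b t => simp [PySem.List.insertBy, h b (by simp)]
  | cons a t ih =>
    by_cases hb : before x a = true
    · simp [PySem.List.insertBy, hb]
    · simp only [List.cons_append, PySem.List.insertBy, hb]
      simp only [Bool.false_eq_true, if_false] at *
      simp [ih, hb]

theorem pv_insertBy_congr {α : Type} (before before' : α → α → Bool) (x : α) (l : List α)
    (h : ∀ y ∈ l, before x y = before' x y) :
    PySem.List.insertBy before x l = PySem.List.insertBy before' x l := by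
  induction l with
  | nil => rfl
  | cons a t ih =>
    have ha := h a (by simp)
    simp only [PySem.List.insertBy, ha]
    split
    · rfl
    · simp [ih (fun y hy => h y (by simp [hy]))]

theorem pv_insertBy_map {α β : Type} (f : α → β) (b1 : α → α → Bool) (b2 : β → β → Bool)
    (x : α) (l : List α) (h : ∀ a, b2 (f x) (f a) = b1 x a) :
    PySem.List.insertBy b2 (f x) (l.map f) = (PySem.List.insertBy b1 x l).map f := by
  induction l with
  | nil => rfl
  | cons a t ih =>
    simp only [List.map_cons, PySem.List.insertBy, h a]
    split <;> simp [ih]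

theorem pv_sorted_map {α β κ : Type} [LinearOrder κ] (f : α → β) (k : β → κ) (l : List α) :
    PySem.List.sorted (l.map f) k false = (PySem.List.sorted l (fun a => k (f a)) false).map f := by
  rw [PySem.List.sorted_eq_foldl_insertBy, PySem.List.sorted_eq_foldl_insertBy]
  suffices H : ∀ (l : List α) (acc : List α),
      (l.map f).foldl (fun acc x => PySem.List.insertBy (fun a b => decide (k a < k b)) x acc) (acc.map f)
        = (l.foldl (fun acc x => PySem.List.insertBy (fun a b => decide (k (f a) < k (f b))) x acc) acc).map f by
    simpa using H l []
  intro l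
  induction l with
  | nil => intro acc; rfl
  | cons a t ih =>
    intro acc
    simp only [List.map_cons, List.foldl_cons]
    rw [pv_insertBy_map f (fun a b => decide (k (f a) < k (f b))) (fun a b => decide (k a < k b)) a acc (fun y => rfl), ih]

theorem pv_sorted_append_singleton {α κ : Type} [LinearOrder κ] (l : List α) (x : α) (key : α → κ) :
    PySem.List.sorted (l ++ [x]) key false
      = PySem.List.insertBy (fun a b => decide (key a < key b)) x (PySem.List.sorted l key false) := by
  rw [PySem.List.sorted_eq_foldl_insertBy, PySem.List.sorted_eq_foldl_insertBy, List.foldl_append]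
  rfl

theorem pv_lexLt_false (x y : (Int × Int × String) × String) (h : pvPairLt (pvRank y) (pvRank x)) :
    pvLexLt x y = false := by
  simp only [pvPairLt, pvRank] at h
  simp only [pvLexLt, Bool.or_eq_false_iff, Bool.and_eq_false_iff, decide_eq_false_iff_not, beq_eq_false_iff_ne]
  rcases h with h | ⟨h1, h2⟩
  · exact ⟨by omega, Or.inl (by omega)⟩
  · exact ⟨by omega, Or.inr ⟨by omega, Or.inl (by omega)⟩⟩

theorem pv_lexLt_true (x y : (Int × Int × String) × String) (h : pvPairLt (pvRank x) (pvRank y)) :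
    pvLexLt x y = true := by
  simp only [pvPairLt, pvRank] at h
  simp only [pvLexLt, Bool.or_eq_true, Bool.and_eq_true, decide_eq_true_eq, beq_iff_eq]
  rcases h with h | ⟨h1, h2⟩
  · exact Or.inl h
  · exact Or.inr ⟨h1, Or.inl h2⟩

theorem pv_lexLt_eq_low (x y : (Int × Int × String) × String) (h : pvRank x = pvRank y) :
    pvLexLt x y = decide (pvLow x < pvLow y) := by
  simp only [pvRank, Prod.mk.injEq] at h
  simp [pvLexLt, pvLow, h.1, h.2, lt_irrefl]

theorem pv_rank_of_mem_bucket (l : List ((Int × Int × String) × String)) (gs : Int × Int)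
    (y : (Int × Int × String) × String) (h : y ∈ pvBucket l gs) : pvRank y = gs := by
  rw [pvBucket, PySem.List.mem_sorted, List.mem_filter] at h
  have := h.2
  simp only [Bool.and_eq_true, beq_iff_eq] at this
  simp [pvRank, this.1, this.2]

theorem pv_pairLt_ne (a b : Int × Int) (h : pvPairLt a b) : a ≠ b := by
  rcases h with h | ⟨h1, h2⟩ <;> intro he <;> subst he <;> omega

theorem pv_main (gss : List (Int × Int)) (hpw : gss.Pairwise pvPairLt)
    (l : List ((Int × Int × String) × String)) (hmem : ∀ x ∈ l, pvRank x ∈ gss) :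
    pvSortA l = (gss.map (pvBucket l)).flatten := by
  induction l using List.reverseRecOn with
  | nil =>
    simp [pvSortA, pvBucket, PySem.List.sorted]
  | append_singleton l x ih =>
    have hmem' : ∀ y ∈ l, pvRank y ∈ gss := fun y hy => hmem y (by simp [hy])
    have hx : pvRank x ∈ gss := hmem x (by simp)
    obtain ⟨u, v, hguv⟩ := List.append_of_mem hx
    subst hguv
    rw [List.pairwise_append] at hpw
    have hv : ∀ b ∈ v, pvPairLt (pvRank x) b := (List.pairwise_cons.mp hpw.2.1).1
    have hu : ∀ a ∈ u, pvPairLt a (pvRank x) := fun a ha => hpw.2.2 a ha (pvRank x) (by simp)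
    -- buckets at ranks ≠ pvRank x are unchanged by appending x
    have hbkt_ne : ∀ gs : Int × Int, gs ≠ pvRank x → pvBucket (l ++ [x]) gs = pvBucket l gs := by
      intro gs hne
      have hpred : (x.1.1 == gs.1 && x.1.2.1 == gs.2) = false := by
        simp only [Bool.and_eq_false_iff, beq_eq_false_iff_ne]
        by_contra hc
        push_neg at hc
        exact hne (by simp [pvRank, hc.1, hc.2])
      simp [pvBucket, List.filter_append, hpred]
    -- the bucket at pvRank x gains x, by stable insertion on low
    have hbkt_eq : pvBucket (l ++ [x]) (pvRank x)
        = PySem.List.insertBy (fun a b => decide (pvLow a < pvLow b)) x (pvBucket l (pvRank x)) := by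
      have hpred : (x.1.1 == (pvRank x).1 && x.1.2.1 == (pvRank x).2) = true := by
        simp [pvRank]
      rw [pvBucket, List.filter_append]
      simp only [List.filter_cons, hpred, List.filter_nil]
      rw [if_pos trivial, pv_sorted_append_singleton]
      rfl
    -- LHS
    have hL : pvSortA (l ++ [x]) = PySem.List.insertBy pvLexLt x (pvSortA l) := by
      simp [pvSortA, List.foldl_append]
    rw [hL, ih hmem']
    -- rewrite both flattened maps over u ++ pvRank x :: v
    simp only [List.map_append, List.map_cons, List.flatten_append, List.flatten_cons]
    have hmapu : u.map (pvBucket (l ++ [x])) = u.map (pvBucket l) := by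
      apply List.map_congr_left
      intro a ha
      exact hbkt_ne a (fun he => pv_pairLt_ne a (pvRank x) (hu a ha) he)
    have hmapv : v.map (pvBucket (l ++ [x])) = v.map (pvBucket l) := by
      apply List.map_congr_left
      intro b hb
      exact hbkt_ne b (fun he => pv_pairLt_ne (pvRank x) b (hv b hb) he.symm)
    rw [hmapu, hmapv, hbkt_eq]
    -- now push the insertion through the concatenation
    rw [pv_insertBy_append_left]
    · rw [pv_insertBy_append_right]
      · rw [pv_insertBy_congr pvLexLt (fun a b => decide (pvLow a < pvLow b)) x]
        intro y hy
        exact pv_lexLt_eq_low x y (pv_rank_of_mem_bucket l (pvRank x) y hy).symm ▸ rfl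
      · intro y hy
        simp only [List.mem_flatten, List.mem_map] at hy
        obtain ⟨bk, ⟨gs, hgs, rfl⟩, hybk⟩ := hy
        exact pv_lexLt_true x y (by rw [pv_rank_of_mem_bucket l gs y hybk]; exact hv gs hgs)
    · intro y hy
      simp only [List.mem_flatten, List.mem_map] at hy
      obtain ⟨bk, ⟨gs, hgs, rfl⟩, hybk⟩ := hy
      exact pv_lexLt_false x y (by rw [pv_rank_of_mem_bucket l gs y hybk]; exact hu gs hgs)

theorem pv_buildA (vo : Bool) (sm : String) (pf : Bool) (L : List String)
    (acc : List ((Int × Int × String) × String)) :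
    L.foldl (pvStepA vo sm pf) acc = acc ++ (L.filter (pvP vo sm)).map (pvFA sm pf) := by
  induction L generalizing acc with
  | nil => simp
  | cons a t ih =>
    rw [List.foldl_cons, ih]
    cases h1 : (vo && !(PySem.Str.startswith (PySem.Str.lower a) "v_")) with
    | true =>
      have hp : pvP vo sm a = false := by unfold pvP; rw [h1]; rfl
      unfold pvStepA
      rw [if_pos h1, List.filter_cons]
      simp [hp]
    | false =>
      cases h2 : (pvMetricSuffixPriority (PySem.Str.lower a) sm).2 with
      | false =>
        have hp : pvP vo sm a = false := by unfold pvP; rw [h2]; simp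
        unfold pvStepA
        rw [if_neg (by rw [h1]; exact Bool.false_ne_true), if_pos (by simp [h2]), List.filter_cons]
        simp [hp]
      | true =>
        have hp : pvP vo sm a = true := by unfold pvP; rw [h1, h2]; rfl
        unfold pvStepA
        rw [if_neg (by rw [h1]; exact Bool.false_ne_true), if_neg (by simp [h2]), List.filter_cons]
        simp [hp, pvFA]

theorem pv_buildB (vo : Bool) (sm : String) (pf : Bool) (L : List String)
    (acc : List (Int × Int × String × String)) :
    L.foldl (pvStepB vo sm pf) acc = acc ++ (L.filter (pvP vo sm)).map (pvFB sm pf) := by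
  induction L generalizing acc with
  | nil => simp
  | cons a t ih =>
    rw [List.foldl_cons, ih]
    cases h1 : (vo && !(PySem.Str.startswith (PySem.Str.lower a) "v_")) with
    | true =>
      have hp : pvP vo sm a = false := by unfold pvP; rw [h1]; rfl
      unfold pvStepB
      rw [if_pos h1, List.filter_cons]
      simp [hp]
    | false =>
      cases h2 : (pvMetricSuffixPriority (PySem.Str.lower a) sm).2 with
      | false =>
        have hp : pvP vo sm a = false := by unfold pvP; rw [h2]; simp
        unfold pvStepB
        rw [if_neg (by rw [h1]; exact Bool.false_ne_true), if_pos (by simp [h2]), List.filter_cons]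
        simp [hp]
      | true =>
        have hp : pvP vo sm a = true := by unfold pvP; rw [h1, h2]; rfl
        unfold pvStepB
        rw [if_neg (by rw [h1]; exact Bool.false_ne_true), if_neg (by simp [h2]), List.filter_cons]
        simp [hp, pvFB]

theorem pv_group_cases (low : String) (pf : Bool) :
    pvGroupPriority low pf = 0 ∨ pvGroupPriority low pf = 1 ∨ pvGroupPriority low pf = 2 ∨
      pvGroupPriority low pf = 3 ∨ pvGroupPriority low pf = 4 := by
  simp only [pvGroupPriority]
  split_ifs <;> simp

theorem pv_suffix_cases (low : String) (sm : String) :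
    (pvMetricSuffixPriority low sm).1 = 0 ∨ (pvMetricSuffixPriority low sm).1 = 1 ∨
      (pvMetricSuffixPriority low sm).1 = 2 ∨ (pvMetricSuffixPriority low sm).1 = 3 := by
  simp only [pvMetricSuffixPriority]
  split_ifs <;> simp


theorem pv_map_fb (sm : String) (pf : Bool) (l : List String) :
    l.map (pvFB sm pf) = (l.map (pvFA sm pf)).map pvReshape := by
  rw [List.map_map]
  apply List.map_congr_left
  intro a _
  simp only [Function.comp_apply, pvFB, pvFA, pvReshape]

theorem pv_gs_pairwise : pvGS.Pairwise pvPairLt := by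
  unfold pvGS pvPairLt
  decide

theorem pv_rank_mem (sm : String) (pf : Bool) (key : String) : pvRank (pvFA sm pf key) ∈ pvGS := by
  have hg := pv_group_cases (PySem.Str.lower key) pf
  have hs := pv_suffix_cases (PySem.Str.lower key) sm
  unfold pvRank pvFA pvGS
  rcases hg with h|h|h|h|h <;> rcases hs with h'|h'|h'|h' <;> simp [h, h']

theorem pv_b_unfold (sv : List (Int × Int × String × String)) :
    (PySem.List.pyRange 0 5 1).foldl (fun acc g =>
      (PySem.List.pyRange 0 4 1).foldl (fun acc2 s =>
        acc2 ++ (PySem.List.sorted ((sv.filter (fun t => t.1 == g && t.2.1 == s)).map (fun t => (t.2.2.1, t.2.2.2))) (fun p => p.1) false).map (fun p => p.2)) acc) []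
    = (pvGS.map (fun gs => (PySem.List.sorted ((sv.filter (fun t => t.1 == gs.1 && t.2.1 == gs.2)).map (fun t => (t.2.2.1, t.2.2.2))) (fun p => p.1) false).map (fun p => p.2))).flatten := by
  have h5 : PySem.List.pyRange 0 5 1 = [0, 1, 2, 3, 4] := by decide
  have h4 : PySem.List.pyRange 0 4 1 = [0, 1, 2, 3] := by decide
  rw [h5]
  simp only [List.foldl_cons, List.foldl_nil, h4, pvGS, List.map_cons, List.map_nil,
    List.flatten_cons, List.flatten_nil, List.append_nil, List.nil_append, List.append_assoc]

theorem pv_bucketB (R : List ((Int × Int × String) × String)) (gs : Int × Int) :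
    (PySem.List.sorted (((R.map pvReshape).filter (fun t => t.1 == gs.1 && t.2.1 == gs.2)).map (fun t => (t.2.2.1, t.2.2.2))) (fun p => p.1) false).map (fun p => p.2)
      = (pvBucket R gs).map (fun p => p.2) := by
  rw [List.filter_map, List.map_map]
  have hf : ((fun t : Int × Int × String × String => (t.2.2.1, t.2.2.2)) ∘ pvReshape)
      = (fun x : (Int × Int × String) × String => (pvLow x, x.2)) := rfl
  have hg : ((fun t : Int × Int × String × String => t.1 == gs.1 && t.2.1 == gs.2) ∘ pvReshape)
      = (fun x : (Int × Int × String) × String => x.1.1 == gs.1 && x.1.2.1 == gs.2) := rfl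
  rw [hf, hg, pv_sorted_map (fun x => (pvLow x, x.2)) (fun p => p.1)
        (R.filter (fun x => x.1.1 == gs.1 && x.1.2.1 == gs.2))]
  rw [List.map_map]
  rfl

-- ===== VERDICT (by name: the statement is the Claim_ definition above) =====
set_option maxHeartbeats 1000000 in
theorem ordered_measurement_keys_py_spec : Claim_equal_ordered_measurement_keys_py := by
  intro ms mm vo sm pf _
  unfold Spec_ordered_measurement_keys_py
  simp only [ordered_measurement_keys_py, ordered_measurement_keys_py_alt]
  have hA : (fun (acc : List ((Int × Int × String) × String)) (key : String) =>
      if vo && !(PySem.Str.startswith (PySem.Str.lower key) "v_") then acc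
      else if !(pvMetricSuffixPriority (PySem.Str.lower key) sm).2 then acc
      else acc ++ [((pvGroupPriority (PySem.Str.lower key) pf, (pvMetricSuffixPriority (PySem.Str.lower key) sm).1, PySem.Str.lower key), key)])
      = pvStepA vo sm pf := rfl
  have hB : (fun (acc : List (Int × Int × String × String)) (key : String) =>
      if vo && !(PySem.Str.startswith (PySem.Str.lower key) "v_") then acc
      else if !(pvMetricSuffixPriority (PySem.Str.lower key) sm).2 then acc
      else acc ++ [(pvGroupPriority (PySem.Str.lower key) pf, (pvMetricSuffixPriority (PySem.Str.lower key) sm).1, PySem.Str.lower key, key)])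
      = pvStepB vo sm pf := rfl
  rw [hA, hB]
  rw [pv_buildA vo sm pf, pv_buildB vo sm pf]
  rw [pv_map_fb, pv_b_unfold]
  simp only [List.nil_append]
  set R := ((PySem.List.dedup (ms.map Prod.fst)).filter (pvP vo sm)).map (pvFA sm pf) with hR
  have hrank : ∀ x ∈ R, pvRank x ∈ pvGS := by
    intro x hx
    rw [hR] at hx
    obtain ⟨k, _, rfl⟩ := List.mem_map.mp hx
    exact pv_rank_mem sm pf k
  have hmain := pv_main pvGS pv_gs_pairwise R hrank
  have hfold : R.foldl (fun acc x => PySem.List.insertBy pvLexLt x acc) [] = pvSortA R := rfl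
  rw [hfold, hmain]
  have hbkts : pvGS.map (fun gs => (PySem.List.sorted (((R.map pvReshape).filter (fun t => t.1 == gs.1 && t.2.1 == gs.2)).map (fun t => (t.2.2.1, t.2.2.2))) (fun p => p.1) false).map (fun p => p.2))
      = pvGS.map (fun gs => (pvBucket R gs).map (fun p => p.2)) :=
    List.map_congr_left (fun gs _ => pv_bucketB R gs)
  rw [hbkts]
  rw [List.map_flatten, List.map_map]
  simp only [Function.comp_def]
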